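-- pv_equiv track=rewrite | github.com/YKawesome/Advent-of-Code | Day 11/Part 1/day11.py | run_iter
-- ===== SOURCE A (Python) =====
-- def run_iter(stones: dict[int, int]) -> dict[int, int]:
--     newstones = {}
--     for stone in stones.keys():
--         while stones[stone] > 0:
--             if stone == 0:
--                 if 1 in newstones:
--                     newstones[1] += 1
--                 else:
--                     newstones[1] = 1
--             elif len(str(stone)) % 2 == 0:
--                 l = str(stone)[:len(str(stone))//2]
--                 r = str(stone)[len(str(stone))//2:]
--                 if int(l) in newstones:
--                     newstones[int(l)] += 1
--                 else:
--                     newstones[int(l)] = 1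
--                 if int(r) in newstones:
--                     newstones[int(r)] += 1
--                 else:
--                     newstones[int(r)] = 1
--             else:
--                 new = stone * 2024
--                 if new in newstones:
--                     newstones[new] += 1
--                 else:
--                     newstones[new] = 1
--             stones[stone] -= 1
--
--     return newstones
-- ===== SOURCE B (Python) =====
-- def run_iter(stones: dict[int, int]) -> dict[int, int]:
--     newstones = {}
--     for stone, count in stones.items():
--         if count <= 0:
--             continue
--         if stone == 0:
--             targets = (1,)
--         else:
--             s = str(stone)
--             if len(s) % 2 == 0:
--                 half = len(s) // 2
--                 targets = (int(s[:half]), int(s[half:]))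
--             else:
--                 targets = (stone * 2024,)
--         for t in targets:
--             newstones[t] = newstones.get(t, 0) + count
--     return newstones
-- ===== Notes on version B (the rewrite author's own statement) =====
-- stated objective: faster
-- what changed: A pops one stone at a time (a while loop that runs count times per key, re-reading and decrementing the mutated counts dict); B makes a single pass over the items and adds each stone's whole count to its target values at once, so the work is per distinct value instead of per individual stone.
import Mathlib
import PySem

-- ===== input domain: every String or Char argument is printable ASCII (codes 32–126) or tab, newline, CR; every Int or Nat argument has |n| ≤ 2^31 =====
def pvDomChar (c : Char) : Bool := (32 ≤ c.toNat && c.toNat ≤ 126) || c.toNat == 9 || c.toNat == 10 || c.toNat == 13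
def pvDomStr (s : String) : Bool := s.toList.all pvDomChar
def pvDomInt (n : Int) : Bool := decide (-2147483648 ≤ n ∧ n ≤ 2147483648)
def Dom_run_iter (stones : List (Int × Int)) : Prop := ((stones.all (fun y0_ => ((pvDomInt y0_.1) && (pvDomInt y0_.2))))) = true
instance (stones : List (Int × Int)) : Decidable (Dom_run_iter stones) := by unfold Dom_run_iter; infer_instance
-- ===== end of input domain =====

-- B replaces A's per-unit while loop (one pass of the dict per individual stone) by a single pass that
-- adds each stone's whole count to its target values at once; equivalence is about the RETURN value only
-- (Python A zeroes the positive counts of its input dict in place, B does not mutate it).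

-- ===== PORT A =====
-- `if k in newstones: newstones[k] += 1 else: newstones[k] = 1`
def bumpOneA (ns : PySem.Dict Int Int) (k : Int) : PySem.Dict Int Int :=
  if ns.contains k then ns.insert k (ns.getD k 0 + 1) else ns.insert k 1

-- the body of A's while loop (one stone processed once); `.getD 0` on int(l)/int(r) is only
-- reached with a some under Pre_ (Python raises ValueError exactly where ofChars? is none)
def stepA (stone : Int) (ns : PySem.Dict Int Int) : PySem.Dict Int Int :=
  if stone == 0 then
    bumpOneA ns 1
  else if PySem.Int.mod (PySem.List.len (PySem.Int.toChars stone)) 2 == 0 then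
    let l := PySem.List.slice (PySem.Int.toChars stone) none
      (some (PySem.Int.floordiv (PySem.List.len (PySem.Int.toChars stone)) 2))
    let r := PySem.List.slice (PySem.Int.toChars stone)
      (some (PySem.Int.floordiv (PySem.List.len (PySem.Int.toChars stone)) 2)) none
    bumpOneA (bumpOneA ns ((PySem.Int.ofChars? l).getD 0)) ((PySem.Int.ofChars? r).getD 0)
  else
    bumpOneA ns (stone * 2024)

-- `while stones[stone] > 0: … ; stones[stone] -= 1`, threading the mutated stones dict
def whileA (stone : Int) (st : PySem.Dict Int Int) (ns : PySem.Dict Int Int) :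
    PySem.Dict Int Int × PySem.Dict Int Int :=
  if h : 0 < st.getD stone 0 then
    whileA stone (st.insert stone (st.getD stone 0 - 1)) (stepA stone ns)
  else (st, ns)
termination_by (st.getD stone 0).toNat
decreasing_by simp only [PySem.Dict.getD_insert_self]; omega

def run_iter (stones : List (Int × Int)) : List (Int × Int) :=
  (((PySem.Dict.mk stones).keys).foldl (fun p k => whileA k p.1 p.2)
    (PySem.Dict.mk stones, PySem.Dict.empty)).2.items

-- ===== PORT B =====
-- the tuple `targets` of Source B; `.getD 0` as in stepA (Python raises exactly where ofChars? is none)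
def targetsB (stone : Int) : List Int :=
  if stone == 0 then [1]
  else
    let s := PySem.Int.toChars stone
    if PySem.Int.mod (PySem.List.len s) 2 == 0 then
      let half := PySem.Int.floordiv (PySem.List.len s) 2
      [(PySem.Int.ofChars? (PySem.List.slice s none (some half))).getD 0,
       (PySem.Int.ofChars? (PySem.List.slice s (some half) none)).getD 0]
    else [stone * 2024]

def run_iter_alt (stones : List (Int × Int)) : List (Int × Int) :=
  (stones.foldl (fun ns p =>
      if p.2 ≤ 0 then ns
      else (targetsB p.1).foldl (fun ns t => ns.insert t (ns.getD t 0 + p.2)) ns)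
    PySem.Dict.empty).items

-- ===== PRECONDITION & SPEC =====
-- Pre_ excludes association lists with duplicate keys, which do not represent a Python dict, and
-- stones from minus nine to minus one with a positive count, on which A raises ValueError when it
-- parses the bare minus sign that is the left half of the stone's two-character string.
def Pre_run_iter (stones : List (Int × Int)) : Prop :=
  (stones.map Prod.fst).Nodup ∧ ∀ p ∈ stones, 0 < p.2 → ¬(-9 ≤ p.1 ∧ p.1 ≤ -1)
instance (stones : List (Int × Int)) : Decidable (Pre_run_iter stones) := by
  unfold Pre_run_iter; infer_instance

def pvWitness_run_iter : (List (Int × Int)) := [(0, 3), (12, 2), (99, 1), (-5, 0)]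

def Spec_run_iter (stones : List (Int × Int)) (out : List (Int × Int)) : Prop := out = run_iter_alt stones
instance (stones : List (Int × Int)) (out : List (Int × Int)) : Decidable (Spec_run_iter stones out) := by
  unfold Spec_run_iter; infer_instance

-- ===== CLAIM (what is proved, stated in full; the proofs are below) =====
def Claim_equal_run_iter : Prop := ∀ (stones : List (Int × Int)), Dom_run_iter stones → Pre_run_iter stones → Spec_run_iter stones (run_iter stones)

-- ===== LEMMAS AND PROOFS =====

-- B's counting update, as a named function for the proofs
def bump (d : PySem.Dict Int Int) (k c : Int) : PySem.Dict Int Int :=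
  d.insert k (d.getD k 0 + c)

theorem bumpOneA_eq_bump (d : PySem.Dict Int Int) (k : Int) : bumpOneA d k = bump d k 1 := by
  unfold bumpOneA bump
  by_cases h : d.contains k = true
  · simp [h]
  · simp only [Bool.not_eq_true] at h
    rw [PySem.Dict.getD_of_not_contains d 0 h, if_neg (by simp [h])]
    norm_num

theorem bump_bump_same (d : PySem.Dict Int Int) (k a b : Int) :
    bump (bump d k a) k b = bump d k (a + b) := by
  unfold bump
  rw [PySem.Dict.getD_insert_self, PySem.Dict.insert_insert_self]
  ring_nf

theorem insert_comm_of_contains (d : PySem.Dict Int Int) (k k' v w : Int)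
    (hne : k ≠ k') (hc : d.contains k = true) :
    (d.insert k' v).insert k w = (d.insert k w).insert k' v := by
  apply PySem.Dict.ext
  have hck : (d.insert k' v).contains k = true := by
    rw [PySem.Dict.contains_insert]; simp [hc]
  by_cases hc' : d.contains k' = true
  · have hck' : (d.insert k w).contains k' = true := by
      rw [PySem.Dict.contains_insert]; simp [hc']
    rw [PySem.Dict.items_insert_of_contains _ _ hck,
        PySem.Dict.items_insert_of_contains _ _ hc',
        PySem.Dict.items_insert_of_contains _ _ hck',
        PySem.Dict.items_insert_of_contains _ _ hc,
        List.map_map, List.map_map]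
    apply List.map_congr_left
    intro p _
    simp only [Function.comp_apply]
    by_cases h1 : p.1 = k' <;> by_cases h2 : p.1 = k <;>
      simp_all [Ne.symm hne]
  · simp only [Bool.not_eq_true] at hc'
    have hck' : (d.insert k w).contains k' = false := by
      rw [PySem.Dict.contains_insert]; simp [hc', Ne.symm hne]
    rw [PySem.Dict.items_insert_of_contains _ _ hck,
        PySem.Dict.items_insert_of_not_contains _ _ hc',
        PySem.Dict.items_insert_of_not_contains _ _ hck',
        PySem.Dict.items_insert_of_contains _ _ hc,
        List.map_append]
    simp [Ne.symm hne]

theorem bump_comm (d : PySem.Dict Int Int) (k k' a b : Int)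
    (hne : k ≠ k') (hc : d.contains k = true) :
    bump (bump d k' a) k b = bump (bump d k b) k' a := by
  unfold bump
  rw [PySem.Dict.getD_insert (d := d) (k := k') (k' := k), if_neg hne,
      PySem.Dict.getD_insert (d := d) (k := k) (k' := k'), if_neg (Ne.symm hne)]
  exact insert_comm_of_contains d k k' _ _ hne hc

theorem contains_bump_self (d : PySem.Dict Int Int) (k c : Int) :
    (bump d k c).contains k = true := by
  unfold bump; exact PySem.Dict.contains_insert_self _ _ _

-- n iterations of the while-loop body
def iterStep (stone : Int) : Nat → PySem.Dict Int Int → PySem.Dict Int Int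
  | 0, d => d
  | n + 1, d => iterStep stone n (stepA stone d)

theorem whileA_snd (stone : Int) : ∀ (n : Nat) (st ns : PySem.Dict Int Int),
    (st.getD stone 0).toNat = n → (whileA stone st ns).2 = iterStep stone n ns := by
  intro n
  induction n with
  | zero =>
    intro st ns h
    rw [whileA]
    have : ¬ 0 < st.getD stone 0 := by omega
    simp [this, iterStep]
  | succ m ih =>
    intro st ns h
    rw [whileA]
    have hpos : 0 < st.getD stone 0 := by omega
    simp only [hpos, dif_pos, iterStep]
    exact ih _ _ (by rw [PySem.Dict.getD_insert_self]; omega)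

theorem whileA_fst (stone : Int) : ∀ (n : Nat) (st ns : PySem.Dict Int Int),
    (st.getD stone 0).toNat = n → ∀ k, k ≠ stone →
    ((whileA stone st ns).1).getD k 0 = st.getD k 0 := by
  intro n
  induction n with
  | zero =>
    intro st ns h k hk
    rw [whileA]
    have : ¬ 0 < st.getD stone 0 := by omega
    simp [this]
  | succ m ih =>
    intro st ns h k hk
    rw [whileA]
    have hpos : 0 < st.getD stone 0 := by omega
    simp only [hpos, dif_pos]
    rw [ih _ _ (by rw [PySem.Dict.getD_insert_self]; omega) k hk,
        PySem.Dict.getD_insert, if_neg hk]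

theorem stepA_eq_fold (stone : Int) (ns : PySem.Dict Int Int) :
    stepA stone ns = (targetsB stone).foldl (fun d t => bump d t 1) ns := by
  simp only [stepA, targetsB]
  split_ifs with h1 h2 <;> simp [bumpOneA_eq_bump]

theorem iter_single (k : Int) (stone : Int)
    (hT : targetsB stone = [k]) :
    ∀ (m : Nat) (d : PySem.Dict Int Int),
    iterStep stone (m + 1) d = bump d k ((m : Int) + 1) := by
  intro m
  induction m with
  | zero =>
    intro d
    simp [iterStep, stepA_eq_fold, hT, List.foldl]
  | succ p ih =>
    intro d
    show iterStep stone (p + 1) (stepA stone d) = _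
    rw [ih (stepA stone d), stepA_eq_fold, hT]
    simp only [List.foldl_cons, List.foldl_nil, bump_bump_same]
    congr 1
    push_cast
    omega

theorem iter_pair (l r : Int) (stone : Int)
    (hT : targetsB stone = [l, r]) :
    ∀ (m : Nat) (d : PySem.Dict Int Int),
    iterStep stone (m + 1) d = bump (bump d l ((m : Int) + 1)) r ((m : Int) + 1) := by
  intro m
  induction m with
  | zero =>
    intro d
    simp [iterStep, stepA_eq_fold, hT, List.foldl]
  | succ p ih =>
    intro d
    show iterStep stone (p + 1) (stepA stone d) = _
    rw [ih (stepA stone d), stepA_eq_fold, hT]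
    simp only [List.foldl_cons, List.foldl_nil]
    by_cases hlr : l = r
    · subst hlr
      simp only [bump_bump_same]
      congr 1
      push_cast
      omega
    · rw [bump_comm (bump d l 1) l r 1 ((p : Int) + 1) hlr (contains_bump_self d l 1)]
      simp only [bump_bump_same]
      have e : (1 : Int) + ((p : Int) + 1) = ((p + 1 : Nat) : Int) + 1 := by push_cast; ring
      rw [e]

theorem targetsB_shape (stone : Int) :
    (∃ k, targetsB stone = [k]) ∨ (∃ l r, targetsB stone = [l, r]) := by
  simp only [targetsB]
  split_ifs <;> simp

-- per-stone: the whole while loop equals B's one update with the full count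
theorem whileA_eq_stepB (stone c : Int) (st ns : PySem.Dict Int Int)
    (hc : st.getD stone 0 = c) :
    (whileA stone st ns).2 =
      (if c ≤ 0 then ns else (targetsB stone).foldl (fun d t => bump d t c) ns) := by
  by_cases hpos : 0 < c
  · have hn : (st.getD stone 0).toNat = (c.toNat - 1) + 1 := by omega
    rw [whileA_snd stone _ st ns hn]
    have hcast : ((c.toNat - 1 : Nat) : Int) + 1 = c := by omega
    rcases targetsB_shape stone with ⟨k, hT⟩ | ⟨l, r, hT⟩
    · rw [iter_single k stone hT, hcast, hT]
      simp [List.foldl, if_neg (by omega : ¬ c ≤ 0)]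
    · rw [iter_pair l r stone hT, hcast, hT]
      simp [List.foldl, if_neg (by omega : ¬ c ≤ 0), bump]
  · rw [whileA_snd stone 0 st ns (by omega), if_pos (by omega)]
    rfl

theorem keys_mk_eq (stones : List (Int × Int)) :
    (PySem.Dict.mk stones).keys = stones.map Prod.fst := by
  simp [PySem.Dict.keys_mk]

theorem getD_mk_of_mem (stones : List (Int × Int)) (p : Int × Int)
    (hnd : (stones.map Prod.fst).Nodup) (hp : p ∈ stones) :
    (PySem.Dict.mk stones).getD p.1 0 = p.2 := by
  apply PySem.Dict.getD_of_mem_items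
  · exact hp
  · simpa [PySem.Dict.keys_mk] using hnd

theorem fold_main (l : List (Int × Int)) :
    ∀ (st ns : PySem.Dict Int Int),
    (∀ p ∈ l, st.getD p.1 0 = p.2) → (l.map Prod.fst).Nodup →
    ((l.map Prod.fst).foldl (fun p k => whileA k p.1 p.2) (st, ns)).2 =
      l.foldl (fun ns p =>
        if p.2 ≤ 0 then ns
        else (targetsB p.1).foldl (fun d t => bump d t p.2) ns) ns := by
  induction l with
  | nil => intro st ns _ _; rfl
  | cons q tl ih =>
    intro st ns hv hnd
    simp only [List.map_cons, List.foldl_cons]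
    have hq : st.getD q.1 0 = q.2 := hv q (by simp)
    have hstep := whileA_eq_stepB q.1 q.2 st ns hq
    have hnd' : (tl.map Prod.fst).Nodup := (List.nodup_cons.mp hnd).2
    have hnotmem : q.1 ∉ tl.map Prod.fst := (List.nodup_cons.mp hnd).1
    have hfst : ∀ p ∈ tl, ((whileA q.1 st ns).1).getD p.1 0 = p.2 := by
      intro p hp
      have hne : p.1 ≠ q.1 := by
        intro hcontra
        exact hnotmem (hcontra ▸ List.mem_map_of_mem hp)
      rw [whileA_fst q.1 (st.getD q.1 0).toNat st ns rfl p.1 hne]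
      exact hv p (by simp [hp])
    have := ih (whileA q.1 st ns).1 (whileA q.1 st ns).2 hfst hnd'
    rw [show (whileA q.1 st ns) = ((whileA q.1 st ns).1, (whileA q.1 st ns).2) from rfl]
    rw [this, hstep]

-- ===== VERDICT (by name: the statement is the Claim_ definition above) =====
theorem run_iter_spec : Claim_equal_run_iter := by
  intro stones _hdom hpre
  unfold Spec_run_iter run_iter run_iter_alt
  obtain ⟨hnd, _⟩ := hpre
  rw [keys_mk_eq]
  rw [fold_main stones (PySem.Dict.mk stones) PySem.Dict.empty
      (fun p hp => getD_mk_of_mem stones p hnd hp) hnd]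
  rfl
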